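-- pv_equiv track=rewrite | github.com/roshinpv1/appgates | codegates/core/llm_analyzer.py | _format_details
-- ===== SOURCE A (Python) =====
-- from typing import List, Dict, Any, Optional
--
-- def _format_details(details: List[str]) -> str:
--     """Format implementation details for prompt"""
--     formatted = []
--     total_length = 0
--
--     for detail in details:
--         if total_length + len(detail) + 1 > 1900:  # Leave room for truncation message
--             formatted.append("... (additional details omitted)")
--             break
--         formatted.append(detail)
--         total_length += len(detail) + 1  # +1 for newline
--
--     return "\n".join(formatted)
-- ===== SOURCE B (Python) =====
-- def _format_details(details):
--     """Format implementation details for prompt"""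
--     cum = []
--     t = 0
--     for d in details:
--         t += len(d) + 1
--         cum.append(t)
--     cut = next((i for i, c in enumerate(cum) if c > 1900), None)
--     if cut is None:
--         return "\n".join(details)
--     return "\n".join(details[:cut] + ["... (additional details omitted)"])
-- ===== Notes on version B (the rewrite author's own statement) =====
-- stated objective: alternative
-- what changed: B replaces A's loop that interleaves threshold checking with incrementally building the output list (appending the sentinel inside the loop via break) by a two-phase search-then-slice decomposition: first compute the inclusive cumulative lengths, then find the first index where they exceed 1900, and finally slice details[:cut] and append the sentinel (or join all when no index exceeds).
import Mathlib
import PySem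

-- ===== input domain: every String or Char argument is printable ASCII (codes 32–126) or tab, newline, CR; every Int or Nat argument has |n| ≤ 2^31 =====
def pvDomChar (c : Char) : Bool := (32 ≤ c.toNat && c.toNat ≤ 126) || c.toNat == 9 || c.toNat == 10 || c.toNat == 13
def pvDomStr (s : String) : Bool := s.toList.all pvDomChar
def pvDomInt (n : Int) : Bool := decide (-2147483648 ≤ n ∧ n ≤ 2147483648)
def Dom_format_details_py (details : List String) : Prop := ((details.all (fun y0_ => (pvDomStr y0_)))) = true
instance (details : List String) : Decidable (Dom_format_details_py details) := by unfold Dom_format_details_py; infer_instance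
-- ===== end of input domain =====

-- B replaces A's single loop (build output + check budget + append sentinel via break)
-- by a search-then-slice decomposition: cumulative lengths, first index over 1900, slice & join.
-- ===== PORT A =====
-- the for-loop of A: state = (formatted, total_length); break modelled by returning
def pvALoop (details : List String) (formatted : List String) (total : Int) : List String :=
  match details with
  | [] => formatted
  | d :: rest =>
    if total + PySem.Str.len d + 1 > 1900 then
      formatted ++ ["... (additional details omitted)"]
    else
      pvALoop rest (formatted ++ [d]) (total + PySem.Str.len d + 1)

def format_details_py (details : List String) : String :=
  PySem.Str.join "\n" (pvALoop details [] 0)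

-- ===== PORT B =====
-- cum: the inclusive cumulative sums of len(d)+1 (Source B's first loop)
def pvCum (details : List String) (t : Int) : List Int :=
  match details with
  | [] => []
  | d :: rest =>
    let t' := t + PySem.Str.len d + 1
    t' :: pvCum rest t'

-- cut = next((i for i, c in enumerate(cum) if c > 1900), None)
def pvFirstOver (cum : List Int) : Option Nat :=
  match cum with
  | [] => none
  | c :: rest => if c > 1900 then some 0 else (pvFirstOver rest).map (· + 1)

def format_details_py_alt (details : List String) : String :=
  match pvFirstOver (pvCum details 0) with
  | none => PySem.Str.join "\n" details
  | some cut =>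
    -- details[:cut] with cut a nonnegative in-range index = take cut
    PySem.Str.join "\n" (details.take cut ++ ["... (additional details omitted)"])

-- ===== PRECONDITION & SPEC =====
def Spec_format_details_py (details : List String) (out : String) : Prop := out = format_details_py_alt details
instance (details : List String) (out : String) : Decidable (Spec_format_details_py details out) := by unfold Spec_format_details_py; infer_instance

-- ===== CLAIM (what is proved, stated in full; the proofs are below) =====
def Claim_equal_format_details_py : Prop := ∀ (details : List String), Dom_format_details_py details → Spec_format_details_py details (format_details_py details)

-- ===== LEMMAS AND PROOFS =====
-- A's loop result, expressed via B's cut search, for any accumulated prefix and total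
theorem pvALoop_eq (details : List String) :
    ∀ (formatted : List String) (total : Int),
    pvALoop details formatted total =
      formatted ++ (match pvFirstOver (pvCum details total) with
        | none => details
        | some cut => details.take cut ++ ["... (additional details omitted)"]) := by
  induction details with
  | nil => intro formatted total; simp [pvALoop, pvCum, pvFirstOver]
  | cons d rest ih =>
    intro formatted total
    simp only [pvALoop, pvCum, pvFirstOver]
    split_ifs with h
    · simp
    · rw [ih]
      cases hf : pvFirstOver (pvCum rest (total + PySem.Str.len d + 1)) <;>
        simp [hf, List.append_assoc]

-- ===== VERDICT (by name: the statement is the Claim_ definition above) =====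
theorem format_details_py_spec : Claim_equal_format_details_py := by
  intro details _
  unfold Spec_format_details_py format_details_py format_details_py_alt
  rw [pvALoop_eq]
  cases hf : pvFirstOver (pvCum details 0) <;> simp
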